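-- pv_equiv track=rewrite | github.com/ramirezfranciscof/codepubs | exactas_programa/cursada_2019v/bosques.py | aplicar_propagacion
-- ===== SOURCE A (Python) =====
-- def contar_casos( lista, tipo ):
--     casos = 0
--     for elemento in lista:
--         if ( elemento == tipo ):
--             casos = casos + 1
--     return casos
--
-- def aplicar_propagacion( bosque ):
--
--     for idx in range( 0, len(bosque)-1, 1 ):
--         if ( (bosque[idx+1]==1) and (bosque[idx]==-1) ):
--             bosque[idx+1] = -1
--
--     for idx in range( len(bosque)-1, 0, -1 ):
--         if ( (bosque[idx-1]==1) and (bosque[idx]==-1) ):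
--             bosque[idx-1] = -1
--
--     return contar_casos( bosque, -1 )
-- ===== SOURCE B (Python) =====
-- def aplicar_propagacion(bosque):
--     # Single forward pass over maximal runs of 1s: a run is burned (filled
--     # with -1 in place, like A) iff the element just left or just right of
--     # the run is -1; counts -1 entries on the way.
--     n = len(bosque)
--     casos = 0
--     i = 0
--     while i < n:
--         if bosque[i] != 1:
--             if bosque[i] == -1:
--                 casos += 1
--             i += 1
--         else:
--             j = i
--             while j < n and bosque[j] == 1:
--                 j += 1
--             if (i > 0 and bosque[i - 1] == -1) or (j < n and bosque[j] == -1):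
--                 for k in range(i, j):
--                     bosque[k] = -1
--                 casos += j - i
--             i = j
--     return casos
-- ===== Notes on version B (the rewrite author's own statement) =====
-- stated objective: simpler
-- what changed: Replaces A's two opposite-direction flood passes (forward then backward index loops) by one pass that partitions the list into maximal runs of 1s and fills a run with -1 iff a -1 borders it, counting -1s in the same pass.
import Mathlib
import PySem

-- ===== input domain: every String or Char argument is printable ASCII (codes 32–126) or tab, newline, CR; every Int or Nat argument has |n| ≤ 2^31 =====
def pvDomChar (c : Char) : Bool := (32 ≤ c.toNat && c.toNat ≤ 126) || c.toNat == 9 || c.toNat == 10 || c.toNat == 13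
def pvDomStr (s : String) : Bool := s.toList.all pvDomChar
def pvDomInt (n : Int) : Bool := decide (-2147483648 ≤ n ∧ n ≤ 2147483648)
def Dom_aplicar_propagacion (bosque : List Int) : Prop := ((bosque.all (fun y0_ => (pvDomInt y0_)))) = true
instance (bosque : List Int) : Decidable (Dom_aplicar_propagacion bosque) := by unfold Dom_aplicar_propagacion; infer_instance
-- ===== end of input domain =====

-- B replaces A's two opposite-direction flood passes by one run-partition pass
-- that fills a run of 1s with -1 iff a -1 borders it (objective: simpler).
-- Both A and B mutate `bosque` in place identically; the theorem is about the
-- returned count only.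


-- ===== PORT A =====
def contar_casos (lista : List Int) (tipo : Int) : Int :=
  lista.foldl (fun casos elemento => if elemento = tipo then casos + 1 else casos) 0

-- first loop: for idx in range(0, len-1, 1): if b[idx+1]==1 and b[idx]==-1: b[idx+1]=-1
def fwdLoop (bosque : List Int) : List Int :=
  (PySem.List.pyRange 0 ((bosque.length : Int) - 1) 1).foldl
    (fun b idx =>
      if PySem.List.pyGetD b (idx + 1) 0 = 1 ∧ PySem.List.pyGetD b idx 0 = -1 then
        PySem.List.pySetD b (idx + 1) (-1)
      else b) bosque

-- second loop: for idx in range(len-1, 0, -1): if b[idx-1]==1 and b[idx]==-1: b[idx-1]=-1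
def bwdLoop (bosque : List Int) : List Int :=
  (PySem.List.pyRange ((bosque.length : Int) - 1) 0 (-1)).foldl
    (fun b idx =>
      if PySem.List.pyGetD b (idx - 1) 0 = 1 ∧ PySem.List.pyGetD b idx 0 = -1 then
        PySem.List.pySetD b (idx - 1) (-1)
      else b) bosque

def aplicar_propagacion (bosque : List Int) : Int :=
  contar_casos (bwdLoop (fwdLoop bosque)) (-1)

-- ===== PORT B =====
-- B's scan over maximal runs of 1s; `prev` is the value just left of the cursor
-- (0 at the start, standing for "no left neighbour").
def altGo (prev : Int) (l : List Int) : Int :=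
  match l with
  | [] => 0
  | x :: xs =>
    if x = 1 then
      -- run of 1s: x plus the leading 1s of xs; burn it iff a -1 borders it
      (if prev = -1 ∨ (xs.dropWhile (fun y => decide (y = 1))).head? = some (-1) then
        ((xs.takeWhile (fun y => decide (y = 1))).length : Int) + 1
      else 0)
        + altGo
            (if prev = -1 ∨ (xs.dropWhile (fun y => decide (y = 1))).head? = some (-1) then -1
             else 1)
            (xs.dropWhile (fun y => decide (y = 1)))
    else
      (if x = -1 then 1 else 0) + altGo x xs
termination_by l.length
decreasing_by
  · simp only [List.length_cons]
    exact Nat.lt_succ_of_le (List.length_dropWhile_le _ _)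
  · simp

def aplicar_propagacion_alt (bosque : List Int) : Int :=
  altGo 0 bosque

-- ===== PRECONDITION & SPEC =====
def Spec_aplicar_propagacion (bosque : List Int) (out : Int) : Prop := out = aplicar_propagacion_alt bosque
instance (bosque : List Int) (out : Int) : Decidable (Spec_aplicar_propagacion bosque out) := by unfold Spec_aplicar_propagacion; infer_instance

-- ===== CLAIM (what is proved, stated in full; the proofs are below) =====
def Claim_equal_aplicar_propagacion : Prop := ∀ (bosque : List Int), Dom_aplicar_propagacion bosque → Spec_aplicar_propagacion bosque (aplicar_propagacion bosque)

-- ===== LEMMAS AND PROOFS =====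

-- structural form of A's forward pass: propagate -1 rightwards through 1s
def fwdRec (prev : Int) : List Int → List Int
  | [] => []
  | x :: xs =>
    let x' := if x = 1 ∧ prev = -1 then -1 else x
    x' :: fwdRec x' xs

-- structural form of A's backward pass: propagate -1 leftwards through 1s
def bwdRec : List Int → List Int
  | [] => []
  | x :: xs =>
    let ys := bwdRec xs
    (if x = 1 ∧ ys.head? = some (-1) then -1 else x) :: ys


-- list indexing/update helpers at a split point
lemma getD_append_len (p : List Int) (x : Int) (t : List Int) :
    (p ++ x :: t).getD p.length 0 = x := by
  induction p with
  | nil => rfl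
  | cons a p ih => simpa using ih

lemma set_append_len (p : List Int) (x v : Int) (t : List Int) :
    (p ++ x :: t).set p.length v = p ++ v :: t := by
  induction p with
  | nil => rfl
  | cons a p ih => simpa using ih

-- the forward index loop is fwdRec on the unprocessed suffix
lemma fwd_inv (t : List Int) : ∀ (p : List Int) (prev : Int),
    (PySem.List.pyRange (p.length : Int) ((p.length : Int) + t.length) 1).foldl
      (fun b idx =>
        if PySem.List.pyGetD b (idx + 1) 0 = 1 ∧ PySem.List.pyGetD b idx 0 = -1 then
          PySem.List.pySetD b (idx + 1) (-1)
        else b) (p ++ prev :: t) = p ++ prev :: fwdRec prev t := by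
  induction t with
  | nil =>
    intro p prev
    rw [PySem.List.pyRange_one_eq_nil (by simp)]
    rfl
  | cons x xs ih =>
    intro p prev
    rw [PySem.List.pyRange_one_cons (by simp only [List.length_cons]; push_cast; omega)]
    simp only [List.foldl_cons]
    have hc : ((p.length : Int) + 1) = (((p.length + 1 : Nat)) : Int) := by push_cast; ring
    have hget0 : PySem.List.pyGetD (p ++ prev :: x :: xs) (p.length : Int) 0 = prev := by
      rw [PySem.List.pyGetD_natCast, getD_append_len]
    have hget1 : PySem.List.pyGetD (p ++ prev :: x :: xs) ((p.length : Int) + 1) 0 = x := by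
      rw [hc, PySem.List.pyGetD_natCast]
      have : p ++ prev :: x :: xs = (p ++ [prev]) ++ x :: xs := by simp
      rw [this]
      have hl : p.length + 1 = (p ++ [prev]).length := by simp
      rw [hl, getD_append_len]
    have hset : PySem.List.pySetD (p ++ prev :: x :: xs) ((p.length : Int) + 1) (-1)
        = p ++ prev :: (-1) :: xs := by
      rw [hc, PySem.List.pySetD_natCast]
      have : p ++ prev :: x :: xs = (p ++ [prev]) ++ x :: xs := by simp
      rw [this]
      have hl : p.length + 1 = (p ++ [prev]).length := by simp
      rw [hl, set_append_len]
      simp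
    have key : ∀ x' : Int,
        (PySem.List.pyRange ((p.length : Int) + 1) ((p.length : Int) + (x :: xs).length) 1).foldl
          (fun b idx =>
            if PySem.List.pyGetD b (idx + 1) 0 = 1 ∧ PySem.List.pyGetD b idx 0 = -1 then
              PySem.List.pySetD b (idx + 1) (-1)
            else b) (p ++ prev :: x' :: xs) = p ++ prev :: x' :: fwdRec x' xs := by
      intro x'
      have h1 : p ++ prev :: x' :: xs = (p ++ [prev]) ++ x' :: xs := by simp
      have h2 : ((p.length : Int) + 1) = (((p ++ [prev]).length : Nat) : Int) := by
        simp
      have h3 : ((p.length : Int) + (x :: xs).length)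
          = (((p ++ [prev]).length : Nat) : Int) + xs.length := by
        simp only [List.length_append, List.length_cons, List.length_nil]
        push_cast
        ring
      rw [h1, h2, h3, ih (p ++ [prev]) x']
      simp
    rw [hget0, hget1]
    by_cases hcond : x = 1 ∧ prev = -1
    · rw [if_pos ⟨hcond.1, hcond.2⟩, hset, key (-1)]
      show _ = p ++ prev :: fwdRec prev (x :: xs)
      simp [fwdRec, hcond.1, hcond.2]
    · rw [if_neg (by tauto), key x]
      show _ = p ++ prev :: fwdRec prev (x :: xs)
      have : (if x = 1 ∧ prev = -1 then (-1 : Int) else x) = x := if_neg hcond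
      simp [fwdRec, this]

lemma fwdLoop_eq (l : List Int) : fwdLoop l = fwdRec 0 l := by
  cases l with
  | nil =>
    unfold fwdLoop
    rw [PySem.List.pyRange_one_eq_nil (by norm_num)]
    rfl
  | cons x xs =>
    unfold fwdLoop
    have h0 : ((x :: xs).length : Int) - 1 = ((([] : List Int).length : Int)) + xs.length := by
      simp
    have h1 : (0 : Int) = ((([] : List Int).length : Int)) := by simp
    rw [h0]
    calc (PySem.List.pyRange ((([] : List Int).length : Int))
            (((([] : List Int).length : Int)) + (xs.length : Int)) 1).foldl _ (x :: xs)
        = [] ++ x :: fwdRec x xs := fwd_inv xs [] x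
      _ = fwdRec 0 (x :: xs) := by simp [fwdRec]

-- split a countdown range at its last element
lemma pyRange_neg_one_snoc (a b : Int) (h : b < a) :
    PySem.List.pyRange a b (-1) = PySem.List.pyRange a (b + 1) (-1) ++ [b + 1] := by
  rw [PySem.List.pyRange_neg_one_eq_reverse, PySem.List.pyRange_one_cons (by omega),
    List.reverse_cons, PySem.List.pyRange_neg_one_eq_reverse]

-- the backward index loop is bwdRec on the unprocessed suffix
lemma bwd_inv (t : List Int) : ∀ (q : List Int) (y : Int),
    (PySem.List.pyRange ((q.length : Int) + t.length) (q.length : Int) (-1)).foldl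
      (fun b idx =>
        if PySem.List.pyGetD b (idx - 1) 0 = 1 ∧ PySem.List.pyGetD b idx 0 = -1 then
          PySem.List.pySetD b (idx - 1) (-1)
        else b) (q ++ y :: t)
    = q ++ (if y = 1 ∧ (bwdRec t).head? = some (-1) then -1 else y) :: bwdRec t := by
  induction t with
  | nil =>
    intro q y
    rw [PySem.List.pyRange_neg_one_eq_nil (by simp)]
    simp [bwdRec]
  | cons x ts ih =>
    intro q y
    rw [pyRange_neg_one_snoc _ _ (by simp only [List.length_cons]; push_cast; omega),
      List.foldl_append]
    have h2 : ((q.length : Int) + (x :: ts).length)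
        = (((q ++ [y]).length : Nat) : Int) + (ts.length : Int) := by
      simp only [List.length_append, List.length_cons, List.length_nil]
      push_cast
      ring
    have h3 : ((q.length : Int) + 1) = (((q ++ [y]).length : Nat) : Int) := by
      simp
    have h1 : q ++ y :: x :: ts = (q ++ [y]) ++ x :: ts := by simp
    rw [h2, h3, h1, ih (q ++ [y]) x]
    have hb : bwdRec (x :: ts)
        = (if x = 1 ∧ (bwdRec ts).head? = some (-1) then (-1 : Int) else x) :: bwdRec ts := by
      simp [bwdRec]
    rw [hb]
    generalize (if x = 1 ∧ (bwdRec ts).head? = some (-1) then (-1 : Int) else x) = x'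
    simp only [List.foldl_cons, List.foldl_nil]
    have hassoc : (q ++ [y]) ++ x' :: bwdRec ts = q ++ y :: x' :: bwdRec ts := by simp
    rw [hassoc]
    have hgm1 : PySem.List.pyGetD (q ++ y :: x' :: bwdRec ts)
        ((((q ++ [y]).length : Nat) : Int) - 1) 0 = y := by
      have he : ((((q ++ [y]).length : Nat) : Int) - 1) = ((q.length : Nat) : Int) := by
        simp
      rw [he, PySem.List.pyGetD_natCast, getD_append_len]
    have hg0 : PySem.List.pyGetD (q ++ y :: x' :: bwdRec ts)
        (((q ++ [y]).length : Nat) : Int) 0 = x' := by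
      rw [PySem.List.pyGetD_natCast]
      have he : q ++ y :: x' :: bwdRec ts = (q ++ [y]) ++ x' :: bwdRec ts := by simp
      rw [he, getD_append_len]
    rw [hgm1, hg0]
    by_cases hcond : y = 1 ∧ x' = -1
    · rw [if_pos hcond]
      have hset : PySem.List.pySetD (q ++ y :: x' :: bwdRec ts)
          ((((q ++ [y]).length : Nat) : Int) - 1) (-1) = q ++ (-1) :: x' :: bwdRec ts := by
        have he : ((((q ++ [y]).length : Nat) : Int) - 1) = ((q.length : Nat) : Int) := by simp
        rw [he, PySem.List.pySetD_natCast, set_append_len]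
      rw [hset]
      have : (if y = 1 ∧ (x' :: bwdRec ts).head? = some (-1) then (-1 : Int) else y) = -1 := by
        simp only [List.head?_cons]
        exact if_pos ⟨hcond.1, by rw [hcond.2]⟩
      rw [this]
    · rw [if_neg hcond]
      have : (if y = 1 ∧ (x' :: bwdRec ts).head? = some (-1) then (-1 : Int) else y) = y := by
        simp only [List.head?_cons]
        apply if_neg
        intro hcc
        exact hcond ⟨hcc.1, by simpa using hcc.2⟩
      rw [this]

lemma bwdLoop_eq (l : List Int) : bwdLoop l = bwdRec l := by
  cases l with
  | nil =>
    unfold bwdLoop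
    rw [PySem.List.pyRange_neg_one_eq_nil (by norm_num)]
    rfl
  | cons y t =>
    unfold bwdLoop
    have h0 : ((y :: t).length : Int) - 1 = ((([] : List Int).length : Int)) + t.length := by
      simp
    rw [h0]
    have := bwd_inv t [] y
    simp only [List.length_nil, Nat.cast_zero, List.nil_append] at this ⊢
    rw [this]
    simp [bwdRec]

-- ===== run-structure lemmas =====

lemma fwdRec_head_ne_one (p q : Int) (l : List Int) (h : l.head? ≠ some 1) :
    fwdRec p l = fwdRec q l := by
  cases l with
  | nil => rfl
  | cons x xs =>
    have hx : x ≠ 1 := by simpa using h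
    simp [fwdRec, hx]

lemma head?_fwdRec (p : Int) (l : List Int) (h : l.head? ≠ some 1) :
    (fwdRec p l).head? = l.head? := by
  cases l with
  | nil => rfl
  | cons x xs =>
    have hx : x ≠ 1 := by simpa using h
    simp [fwdRec, hx]

lemma fwdRec_replicate_neg (k : Nat) (rest : List Int) :
    fwdRec (-1) (List.replicate k 1 ++ rest) = List.replicate k (-1) ++ fwdRec (-1) rest := by
  induction k with
  | zero => simp
  | succ k ih => simp [List.replicate_succ, fwdRec, ih]

lemma fwdRec_replicate_pos (k : Nat) (prev : Int) (hp : prev ≠ -1) (rest : List Int)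
    (hr : rest.head? ≠ some 1) :
    fwdRec prev (List.replicate k 1 ++ rest) = List.replicate k 1 ++ fwdRec 0 rest := by
  induction k generalizing prev with
  | zero => simpa using fwdRec_head_ne_one prev 0 rest hr
  | succ k ih => simp [List.replicate_succ, fwdRec, hp, ih 1 (by norm_num)]

lemma head?_bwdRec (l : List Int) (h : l.head? ≠ some 1) :
    (bwdRec l).head? = l.head? := by
  cases l with
  | nil => rfl
  | cons x xs =>
    have hx : x ≠ 1 := by simpa using h
    simp [bwdRec, hx]

lemma bwdRec_replicate_neg (k : Nat) (rest : List Int) :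
    bwdRec (List.replicate k (-1) ++ rest) = List.replicate k (-1) ++ bwdRec rest := by
  induction k with
  | zero => simp
  | succ k ih => simp [List.replicate_succ, bwdRec, ih]

lemma bwd_ones_neg (k : Nat) (F : List Int) (h : (bwdRec F).head? = some (-1)) :
    bwdRec (List.replicate k 1 ++ F) = List.replicate k (-1) ++ bwdRec F := by
  induction k with
  | zero => simp
  | succ k ih =>
    simp only [List.replicate_succ, List.cons_append, bwdRec, ih]
    cases k with
    | zero => simp [h]
    | succ k => simp [List.replicate_succ]

lemma bwd_ones_pos (k : Nat) (F : List Int) (h : (bwdRec F).head? ≠ some (-1)) :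
    bwdRec (List.replicate k 1 ++ F) = List.replicate k 1 ++ bwdRec F := by
  induction k with
  | zero => simp
  | succ k ih =>
    simp only [List.replicate_succ, List.cons_append, bwdRec, ih]
    cases k with
    | zero => simp [h]
    | succ k => simp [List.replicate_succ]

lemma tw_rep (xs : List Int) :
    xs.takeWhile (fun y => decide (y = 1))
      = List.replicate (xs.takeWhile (fun y => decide (y = 1))).length 1 := by
  induction xs with
  | nil => rfl
  | cons x xs ih =>
    by_cases hx : x = 1
    · subst hx
      rw [show List.takeWhile (fun y => decide (y = 1)) (1 :: xs)
            = 1 :: List.takeWhile (fun y => decide (y = 1)) xs from by simp]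
      simp only [List.length_cons, List.replicate_succ]
      exact congrArg (1 :: ·) ih
    · simp [hx]

lemma head?_dropWhile_ne (xs : List Int) :
    (xs.dropWhile (fun y => decide (y = 1))).head? ≠ some 1 := by
  induction xs with
  | nil => simp
  | cons x xs ih =>
    by_cases hx : x = 1
    · simpa [List.dropWhile_cons, hx] using ih
    · simp [hx]

lemma altGo_head_ne_one (p q : Int) (l : List Int) (h : l.head? ≠ some 1) :
    altGo p l = altGo q l := by
  cases l with
  | nil => simp [altGo]
  | cons x xs =>
    have hx : x ≠ 1 := by simpa using h
    rw [altGo, altGo]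
    simp [hx]

-- count of -1 entries of the A-side result, as an Int, equals B's run count
lemma main_aux : ∀ (n : Nat) (l : List Int), l.length ≤ n → ∀ prev : Int,
    (((bwdRec (fwdRec prev l)).countP (fun e => decide (e = -1)) : Nat) : Int)
      = altGo prev l := by
  intro n
  induction n with
  | zero =>
    intro l hl prev
    have hnil : l = [] := by cases l with | nil => rfl | cons a t => simp at hl
    subst hnil
    simp [fwdRec, bwdRec, altGo]
  | succ n ih =>
    intro l hl prev
    match l with
    | [] => simp [fwdRec, bwdRec, altGo]
    | x :: xs =>
      have hxs : xs.length ≤ n := by simpa using hl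
      by_cases hx : x = 1
      · subst hx
        have h11 : (1 : Int) = 1 := rfl
        rw [altGo, if_pos h11]
        set tw := xs.takeWhile (fun y => decide (y = 1)) with htw
        set rest := xs.dropWhile (fun y => decide (y = 1)) with hrest
        have hr : rest.head? ≠ some 1 := head?_dropWhile_ne xs
        have hsplit : (1 : Int) :: xs = List.replicate (tw.length + 1) 1 ++ rest := by
          calc (1 : Int) :: xs = 1 :: (tw ++ rest) := by
                rw [htw, hrest, List.takeWhile_append_dropWhile]
            _ = List.replicate (tw.length + 1) 1 ++ rest := by
                rw [List.replicate_succ]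
                simp only [List.cons_append]
                rw [← tw_rep xs, ← htw]
        have ihr : ∀ p : Int,
            (((bwdRec (fwdRec p rest)).countP (fun e => decide (e = -1)) : Nat) : Int)
              = altGo p rest :=
          fun p => ih rest (le_trans (List.length_dropWhile_le _ _) hxs) p
        have c1 : (List.replicate (tw.length + 1) (-1 : Int)).countP
            (fun e => decide (e = -1)) = tw.length + 1 := by simp [List.countP_replicate]
        have c2 : (List.replicate (tw.length + 1) (1 : Int)).countP
            (fun e => decide (e = -1)) = 0 := by simp [List.countP_replicate]
        by_cases hp : prev = -1
        · subst hp
          have hc : ((-1 : Int) = -1 ∨ rest.head? = some (-1)) := Or.inl rfl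
          simp only [if_pos hc]
          rw [hsplit, fwdRec_replicate_neg, bwdRec_replicate_neg, List.countP_append, c1]
          push_cast
          rw [ihr (-1)]
          try simp
          try ring
        · rw [hsplit, fwdRec_replicate_pos _ prev hp rest hr]
          have hGhead : (bwdRec (fwdRec 0 rest)).head? = rest.head? := by
            rw [head?_bwdRec _ (by rw [head?_fwdRec _ _ hr]; exact hr), head?_fwdRec _ _ hr]
          by_cases hneg : rest.head? = some (-1)
          · have hc : (prev = -1 ∨ rest.head? = some (-1)) := Or.inr hneg
            simp only [if_pos hc]
            rw [bwd_ones_neg _ _ (by rw [hGhead]; exact hneg), List.countP_append, c1]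
            push_cast
            rw [ihr 0, altGo_head_ne_one 0 (-1) rest hr]
          · have hc : ¬ (prev = -1 ∨ rest.head? = some (-1)) := by
              rintro (h | h)
              exacts [hp h, hneg h]
            simp only [if_neg hc]
            rw [bwd_ones_pos _ _ (by rw [hGhead]; exact hneg), List.countP_append, c2]
            push_cast
            rw [ihr 0, altGo_head_ne_one 0 1 rest hr]
            try simp
            try ring
      · have hfw : fwdRec prev (x :: xs) = x :: fwdRec x xs := by simp [fwdRec, hx]
        have hbw : bwdRec (x :: fwdRec x xs) = x :: bwdRec (fwdRec x xs) := by
          simp [bwdRec, hx]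
        rw [altGo, if_neg hx, hfw, hbw, List.countP_cons]
        push_cast
        rw [ih xs hxs x]
        by_cases hneg : x = -1 <;> simp [hneg] <;> try ring

lemma main_count (prev : Int) (l : List Int) :
    (((bwdRec (fwdRec prev l)).countP (fun e => decide (e = -1)) : Nat) : Int)
      = altGo prev l :=
  main_aux l.length l le_rfl prev

theorem aplicar_propagacion_spec : Claim_equal_aplicar_propagacion := by
  intro l _
  unfold Spec_aplicar_propagacion aplicar_propagacion aplicar_propagacion_alt contar_casos
  rw [fwdLoop_eq, bwdLoop_eq, PySem.List.foldl_ite_add_one]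
  simpa using main_count 0 l
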